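-- pv_equiv track=rewrite | github.com/vanh1012/Ares-s-Adventure | Source/Algorithm/BFS.py | parse_grid
-- ===== SOURCE A (Python) =====
-- def parse_grid(grid):
--     player_pos = None
--     boxes = []
--     goals = []
--     for r, row in enumerate(grid):
--         for c, ch in enumerate(row):
--             if ch == "@":
--                 player_pos = (r, c)
--             elif ch == "$":
--                 boxes.append((r, c))
--             elif ch == ".":
--                 goals.append((r, c))
--     return player_pos, boxes, goals
-- ===== SOURCE B (Python) =====
-- def parse_grid(grid):
--     players = [(r, c) for r, row in enumerate(grid) for c, ch in enumerate(row) if ch == "@"]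
--     boxes = [(r, c) for r, row in enumerate(grid) for c, ch in enumerate(row) if ch == "$"]
--     goals = [(r, c) for r, row in enumerate(grid) for c, ch in enumerate(row) if ch == "."]
--     return (players[-1] if players else None), boxes, goals
-- ===== Notes on version B (the rewrite author's own statement) =====
-- stated objective: alternative
-- what changed: Replaces the single interleaved stateful double loop with three independent comprehension passes (players/boxes/goals) and takes the last '@' position from the players list.
import Mathlib
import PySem

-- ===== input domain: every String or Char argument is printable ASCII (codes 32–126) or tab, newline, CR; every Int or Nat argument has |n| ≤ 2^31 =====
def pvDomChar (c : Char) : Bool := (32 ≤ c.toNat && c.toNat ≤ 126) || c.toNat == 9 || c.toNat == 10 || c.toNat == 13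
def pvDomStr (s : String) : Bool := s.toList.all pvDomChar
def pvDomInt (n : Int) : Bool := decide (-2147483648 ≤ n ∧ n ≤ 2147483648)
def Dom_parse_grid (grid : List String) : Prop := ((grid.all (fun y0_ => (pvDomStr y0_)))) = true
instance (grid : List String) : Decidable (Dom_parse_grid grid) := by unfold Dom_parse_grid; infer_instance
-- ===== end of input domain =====

-- B replaces A's single interleaved stateful double loop with three independent
-- comprehension passes (players, boxes, goals), taking the last '@' as the player.

-- ===== PORT A =====
-- single pass over the grid, one mutable state (player_pos, boxes, goals)
def parse_grid (grid : List String) : (Option (Int × Int)) × (List (Int × Int)) × (List (Int × Int)) :=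
  (PySem.List.enumerate grid 0).foldl
    (fun st rrow =>
      (PySem.List.enumerate rrow.2.toList 0).foldl
        (fun st2 cch =>
          if cch.2 = '@' then (some (rrow.1, cch.1), st2.2.1, st2.2.2)
          else if cch.2 = '$' then (st2.1, st2.2.1 ++ [(rrow.1, cch.1)], st2.2.2)
          else if cch.2 = '.' then (st2.1, st2.2.1, st2.2.2 ++ [(rrow.1, cch.1)])
          else st2)
        st)
    (none, [], [])

-- ===== PORT B =====
-- one comprehension per bucket: positions of `target` in row-major order
def pvPick (grid : List String) (target : Char) : List (Int × Int) :=
  (PySem.List.enumerate grid 0).flatMap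
    (fun rrow =>
      (PySem.List.enumerate rrow.2.toList 0).filterMap
        (fun cch => if cch.2 = target then some (rrow.1, cch.1) else none))

def parse_grid_alt (grid : List String) : (Option (Int × Int)) × (List (Int × Int)) × (List (Int × Int)) :=
  let players := pvPick grid '@'
  let boxes := pvPick grid '$'
  let goals := pvPick grid '.'
  ((players.getLast?), boxes, goals)

-- ===== PRECONDITION & SPEC =====
def Spec_parse_grid (grid : List String) (out : (Option (Int × Int)) × (List (Int × Int)) × (List (Int × Int))) : Prop := out = parse_grid_alt grid
instance (grid : List String) (out : (Option (Int × Int)) × (List (Int × Int)) × (List (Int × Int))) : Decidable (Spec_parse_grid grid out) := by unfold Spec_parse_grid; infer_instance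

-- ===== CLAIM (what is proved, stated in full; the proofs are below) =====
def Claim_equal_parse_grid : Prop := ∀ (grid : List String), Dom_parse_grid grid → Spec_parse_grid grid (parse_grid grid)

-- ===== LEMMAS AND PROOFS =====

theorem getLast?_cons_or {α : Type} (a : α) (l : List α) (p : Option α) :
    (Option.or (a :: l).getLast? p) = Option.or l.getLast? (some a) := by
  cases l with
  | nil => simp
  | cons b t => simp [List.getLast?_cons, Option.or]

-- one row of A's inner loop, generalized over the starting state
theorem row_fold (cells : List (Int × Char)) (r : Int)
    (p : Option (Int × Int)) (bs gs : List (Int × Int)) :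
    cells.foldl
      (fun st2 cch =>
        if cch.2 = '@' then (some (r, cch.1), st2.2.1, st2.2.2)
        else if cch.2 = '$' then (st2.1, st2.2.1 ++ [(r, cch.1)], st2.2.2)
        else if cch.2 = '.' then (st2.1, st2.2.1, st2.2.2 ++ [(r, cch.1)])
        else st2)
      (p, bs, gs)
    = (Option.or (cells.filterMap (fun cch => if cch.2 = '@' then some (r, cch.1) else none)).getLast? p,
       bs ++ cells.filterMap (fun cch => if cch.2 = '$' then some (r, cch.1) else none),
       gs ++ cells.filterMap (fun cch => if cch.2 = '.' then some (r, cch.1) else none)) := by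
  induction cells generalizing p bs gs with
  | nil => simp
  | cons x t ih =>
    by_cases h1 : x.2 = '@'
    · simp [List.foldl_cons, h1, ih, getLast?_cons_or]
    · by_cases h2 : x.2 = '$'
      · simp [List.foldl_cons, h2, ih]
      · by_cases h3 : x.2 = '.'
        · simp [List.foldl_cons, h3, ih]
        · simp [List.foldl_cons, h1, h2, h3, ih]

def pvPickFrom (grid : List String) (s : Int) (target : Char) : List (Int × Int) :=
  (PySem.List.enumerate grid s).flatMap
    (fun rrow =>
      (PySem.List.enumerate rrow.2.toList 0).filterMap
        (fun cch => if cch.2 = target then some (rrow.1, cch.1) else none))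

theorem grid_fold (grid : List String) (s : Int)
    (p : Option (Int × Int)) (bs gs : List (Int × Int)) :
    (PySem.List.enumerate grid s).foldl
      (fun st rrow =>
        (PySem.List.enumerate rrow.2.toList 0).foldl
          (fun st2 cch =>
            if cch.2 = '@' then (some (rrow.1, cch.1), st2.2.1, st2.2.2)
            else if cch.2 = '$' then (st2.1, st2.2.1 ++ [(rrow.1, cch.1)], st2.2.2)
            else if cch.2 = '.' then (st2.1, st2.2.1, st2.2.2 ++ [(rrow.1, cch.1)])
            else st2)
          st)
      (p, bs, gs)
    = (Option.or (pvPickFrom grid s '@').getLast? p,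
       bs ++ pvPickFrom grid s '$',
       gs ++ pvPickFrom grid s '.') := by
  induction grid generalizing s p bs gs with
  | nil => simp [pvPickFrom, PySem.List.enumerate_nil]
  | cons row t ih =>
    simp only [PySem.List.enumerate_cons, List.foldl_cons, row_fold, ih,
      pvPickFrom, List.flatMap_cons, List.append_assoc, List.getLast?_append,
      Option.or_assoc]

theorem parse_grid_spec : Claim_equal_parse_grid := by
  intro grid _
  unfold Spec_parse_grid parse_grid parse_grid_alt
  rw [grid_fold]
  simp [pvPick, pvPickFrom]
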